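-- pv_equiv track=rewrite | github.com/DavidSilveraGabriel/NILES | utils.py | sanitize_output
-- ===== SOURCE A (Python) =====
-- def sanitize_output(text: str) -> str:
--     """
--     Sanitiza el texto de salida para prevenir XSS y otros problemas de seguridad.
--
--     Args:
--         text (str): Texto a sanitizar
--
--     Returns:
--         str: Texto sanitizado
--     """
--     # Implementar sanitización básica
--     dangerous_patterns = {
--         '<script': '&lt;script',
--         'javascript:': 'javascript&#58;',
--         'data:': 'data&#58;',
--         'onclick': 'onclick&#58;',
--         'onerror': 'onerror&#58;'
--     }
--
--     sanitized_text = text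
--     for pattern, replacement in dangerous_patterns.items():
--         sanitized_text = sanitized_text.replace(pattern, replacement)
--
--     return sanitized_text
-- ===== SOURCE B (Python) =====
-- def sanitize_output(text: str) -> str:
--     """Single left-to-right scan: at each position substitute the first matching
--     dangerous pattern instead of running five separate full-text replace passes."""
--     dangerous_patterns = {
--         '<script': '&lt;script',
--         'javascript:': 'javascript&#58;',
--         'data:': 'data&#58;',
--         'onclick': 'onclick&#58;',
--         'onerror': 'onerror&#58;'
--     }
--     out = []
--     i = 0
--     n = len(text)
--     while i < n:
--         for pattern, replacement in dangerous_patterns.items():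
--             if text.startswith(pattern, i):
--                 out.append(replacement)
--                 i += len(pattern)
--                 break
--         else:
--             out.append(text[i])
--             i += 1
--     return ''.join(out)
-- ===== Notes on version B (the rewrite author's own statement) =====
-- stated objective: alternative
-- what changed: B replaces A's five sequential full-text str.replace passes by a single left-to-right scan that, at each position, substitutes the replacement of the first matching dangerous pattern and skips it; this is the one-pass alternation the patterns' non-overlap makes exact.
import Mathlib
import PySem

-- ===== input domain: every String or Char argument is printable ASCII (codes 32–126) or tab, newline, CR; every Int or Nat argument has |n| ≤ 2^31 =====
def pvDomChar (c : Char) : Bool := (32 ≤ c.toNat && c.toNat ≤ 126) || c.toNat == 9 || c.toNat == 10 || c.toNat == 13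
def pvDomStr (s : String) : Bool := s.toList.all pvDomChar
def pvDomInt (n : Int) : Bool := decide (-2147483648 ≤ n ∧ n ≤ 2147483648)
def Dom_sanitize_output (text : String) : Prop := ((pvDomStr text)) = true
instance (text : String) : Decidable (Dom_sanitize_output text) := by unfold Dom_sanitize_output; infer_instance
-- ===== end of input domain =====

-- B replaces A's five sequential full-text replace passes by a single left-to-right
-- scan that substitutes the first matching dangerous pattern at each position (alternative).


-- ===== PORT A =====
-- five sequential str.replace passes over the dict items, as in the Python
def sanitize_output (text : String) : String :=
  let dangerous_patterns : PySem.Dict String String :=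
    PySem.Dict.ofList
      [("<script", "&lt;script"),
       ("javascript:", "javascript&#58;"),
       ("data:", "data&#58;"),
       ("onclick", "onclick&#58;"),
       ("onerror", "onerror&#58;")]
  dangerous_patterns.items.foldl
    (fun sanitized_text pr => PySem.Str.replace sanitized_text pr.1 pr.2) text

-- ===== PORT B =====
-- the (pattern, replacement) pairs, in dict order
def pvPatterns : List (List Char × List Char) :=
  [("<script".toList, "&lt;script".toList),
   ("javascript:".toList, "javascript&#58;".toList),
   ("data:".toList, "data&#58;".toList),
   ("onclick".toList, "onclick&#58;".toList),
   ("onerror".toList, "onerror&#58;".toList)]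

-- the while-loop of Source B: at each position emit the first matching pattern's
-- replacement and skip the pattern, else emit the character and advance
def sanitize_scan (pats : List (List Char × List Char)) : List Char → List Char
  | [] => []
  | c :: t =>
    match pats.find? (fun pr => pr.1.isPrefixOf (c :: t)) with
    | some pr => pr.2 ++ sanitize_scan pats (t.drop (pr.1.length - 1))
    | none => c :: sanitize_scan pats t
termination_by s => s.length
decreasing_by all_goals (simp only [List.length_drop, List.length_cons]; omega)

def sanitize_output_alt (text : String) : String :=
  String.ofList (sanitize_scan pvPatterns text.toList)

-- ===== PRECONDITION & SPEC =====
def Spec_sanitize_output (text : String) (out : String) : Prop := out = sanitize_output_alt text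
instance (text : String) (out : String) : Decidable (Spec_sanitize_output text out) := by unfold Spec_sanitize_output; infer_instance

-- ===== CLAIM (what is proved, stated in full; the proofs are below) =====
def Claim_equal_sanitize_output : Prop := ∀ (text : String), Dom_sanitize_output text → Spec_sanitize_output text (sanitize_output text)

-- ===== LEMMAS AND PROOFS =====

def repOne (old new : List Char) : List Char → List Char
  | [] => []
  | c :: t =>
    if old.isPrefixOf (c :: t) then new ++ repOne old new (t.drop (old.length - 1))
    else c :: repOne old new t
termination_by s => s.length
decreasing_by all_goals (simp only [List.length_drop, List.length_cons]; omega)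

theorem repOne_pos (old new : List Char) (c : Char) (t : List Char)
    (h : old <+: (c :: t)) :
    repOne old new (c :: t) = new ++ repOne old new (t.drop (old.length - 1)) := by
  rw [repOne]; simp [List.isPrefixOf_iff_prefix, h]

theorem repOne_neg (old new : List Char) (c : Char) (t : List Char)
    (h : ¬ old <+: (c :: t)) :
    repOne old new (c :: t) = c :: repOne old new t := by
  rw [repOne]; simp [List.isPrefixOf_iff_prefix, h]

theorem go_eq (old new : List Char) (hold : old ≠ []) :
    ∀ (fuel : Nat) (l acc : List Char), l.length ≤ fuel →
      PySem.Chars.replace.go old new fuel l acc = acc.reverse ++ repOne old new l := by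
  intro fuel
  induction fuel with
  | zero =>
    intro l acc h
    have hl : l = [] := by cases l <;> simp_all
    subst hl
    rw [PySem.Chars.replace.go]
    simp [repOne]
  | succ n ih =>
    intro l acc h
    cases l with
    | nil => rw [PySem.Chars.replace.go]; simp [repOne]; omega
    | cons c t =>
      rw [PySem.Chars.replace.go]
      have hop : 0 < old.length := List.length_pos_of_ne_nil hold
      by_cases hp : old <+: (c :: t)
      · rw [if_pos (List.isPrefixOf_iff_prefix.2 hp)]
        have hlen : (List.drop old.length (c :: t)).length ≤ n := by
          simp only [List.length_drop, List.length_cons]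
          simp only [List.length_cons] at h
          omega
        rw [ih _ _ hlen, repOne_pos old new c t hp]
        have hd : List.drop old.length (c :: t) = t.drop (old.length - 1) := by
          rcases old with _ | ⟨d, o⟩
          · exact absurd rfl hold
          · simp
        rw [hd]
        simp
      · rw [if_neg (fun hb => hp (List.isPrefixOf_iff_prefix.1 hb))]
        have h2 : t.length ≤ n := by simp at h; omega
        rw [ih t (c :: acc) h2, repOne_neg old new c t hp]
        simp

theorem replace_eq_repOne (s old new : List Char) (hold : old ≠ []) :
    PySem.Chars.replace s old new = repOne old new s := by
  rw [PySem.Chars.replace]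
  rw [if_neg (by simp [List.isEmpty_iff, hold])]
  rw [go_eq old new hold s.length s [] (le_refl _)]
  simp

theorem repOne_append_self (old new rest : List Char) (hold : old ≠ []) :
    repOne old new (old ++ rest) = new ++ repOne old new rest := by
  rcases old with _ | ⟨d, o⟩
  · exact absurd rfl hold
  · rw [show (d :: o) ++ rest = d :: (o ++ rest) from rfl]
    rw [repOne_pos _ new d (o ++ rest) ⟨rest, rfl⟩]
    simp

def noCross (px pat : List Char) : Bool :=
  px.tails.all (fun suf => suf.isEmpty || (!(List.isPrefixOf suf pat) && !(List.isPrefixOf pat suf)))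

theorem repOne_skip (px pat rep : List Char) (h : noCross px pat = true) (rest : List Char) :
    repOne pat rep (px ++ rest) = px ++ repOne pat rep rest := by
  induction px with
  | nil => simp
  | cons c u ih =>
    have hpair : ¬ (c :: u) <+: pat ∧ ¬ pat <+: (c :: u) := by
      have := (List.all_eq_true.1 h) (c :: u) (by simp [List.mem_tails])
      simp only [List.isEmpty_iff, Bool.or_eq_true, Bool.and_eq_true, Bool.not_eq_true'] at this
      rcases this with h1 | ⟨h1, h2⟩
      · exact absurd h1 (by simp)
      · exact ⟨by simp [← List.isPrefixOf_iff_prefix, h1], by simp [← List.isPrefixOf_iff_prefix, h2]⟩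
    have h' : noCross u pat = true := by
      rw [noCross, List.all_eq_true]
      intro suf hsuf
      exact (List.all_eq_true.1 h) suf (by
        simp [List.mem_tails] at hsuf ⊢
        exact Or.inr hsuf)
    have hnp : ¬ pat <+: ((c :: u) ++ rest) := by
      intro hp
      rcases Nat.lt_or_ge (c :: u).length pat.length with hlt | hle
      · exact hpair.1 (List.prefix_of_prefix_length_le (List.prefix_append _ _) hp (Nat.le_of_lt hlt))
      · exact hpair.2 (List.prefix_of_prefix_length_le hp (List.prefix_append _ _) hle)
    rw [show (c :: u) ++ rest = c :: (u ++ rest) from rfl] at hnp ⊢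
    rw [repOne_neg pat rep c (u ++ rest) hnp, ih h']
    simp

def ampOk (pat rep : List Char) : Bool :=
  rep.contains '&' && rep.inits.all (fun w => w.contains '&' || List.isPrefixOf w pat)

theorem repOne_prefix_transfer (pat rep : List Char) (h : ampOk pat rep = true) :
    ∀ (s w : List Char), w <+: repOne pat rep s → '&' ∉ w → w <+: s := by
  rw [ampOk, Bool.and_eq_true] at h
  intro s
  induction s using repOne.induct (old := pat) with
  | case1 => intro w hw _; simpa [repOne] using hw
  | case2 c t hp ih =>
    intro w hw hamp
    have hp' : pat <+: (c :: t) := List.isPrefixOf_iff_prefix.1 hp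
    rw [repOne_pos pat rep c t hp'] at hw
    have hrep : '&' ∈ rep := by simpa using h.1
    rcases Nat.lt_or_ge rep.length w.length with hlt | hle
    · exact absurd ((List.prefix_of_prefix_length_le (List.prefix_append _ _) hw (Nat.le_of_lt hlt)).subset hrep) hamp
    · have hwr : w <+: rep := List.prefix_of_prefix_length_le hw (List.prefix_append _ _) hle
      have hall := (List.all_eq_true.1 h.2) w (by simp [List.mem_inits]; exact hwr)
      simp only [Bool.or_eq_true] at hall
      rcases hall with h1 | h2
      · exact absurd (by simpa using h1) hamp
      · exact (List.isPrefixOf_iff_prefix.1 h2).trans hp'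
  | case3 c t hp ih =>
    intro w hw hamp
    have hp' : ¬ pat <+: (c :: t) := fun hb => by simp [List.isPrefixOf_iff_prefix.2 hb] at hp
    rw [repOne_neg pat rep c t hp'] at hw
    cases w with
    | nil => exact List.nil_prefix
    | cons d w' =>
      rcases List.cons_prefix_cons.1 hw with ⟨rfl, hw'⟩
      have : w' <+: t := ih w' hw' (fun hm => hamp (List.mem_cons_of_mem _ hm))
      exact List.cons_prefix_cons.2 ⟨rfl, this⟩


theorem scan_step_match (pats : List (List Char × List Char)) (p r : List Char)
    (c : Char) (t rest : List Char)
    (hfind : pats.find? (fun pr => pr.1.isPrefixOf (c :: t)) = some (p, r))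
    (hp : p ++ rest = c :: t) (hpne : p ≠ []) :
    sanitize_scan pats (c :: t) = r ++ sanitize_scan pats rest := by
  rcases p with _ | ⟨d, p'⟩
  · exact absurd rfl hpne
  · have hp' : d :: (p' ++ rest) = c :: t := by simpa using hp
    injection hp' with hdc ht
    rw [sanitize_scan, hfind]
    simp only []
    have hd : List.drop ((d :: p').length - 1) t = rest := by
      rw [← ht]; simp
    rw [hd]

theorem main_aux : ∀ (n : Nat) (s : List Char), s.length ≤ n →
    repOne "onerror".toList "onerror&#58;".toList (repOne "onclick".toList "onclick&#58;".toList (repOne "data:".toList "data&#58;".toList (repOne "javascript:".toList "javascript&#58;".toList (repOne "<script".toList "&lt;script".toList s)))) = sanitize_scan pvPatterns s := by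
  intro n
  induction n with
  | zero =>
    intro s h
    have hs : s = [] := by cases s <;> simp_all
    subst hs
    simp [repOne, sanitize_scan]
  | succ n ih =>
    intro s h
    cases s with
    | nil => simp [repOne, sanitize_scan]
    | cons c t =>
      by_cases h1 : "<script".toList <+: (c :: t)
      · obtain ⟨rest, hrest⟩ := h1
        have hposb : (fun pr : List Char × List Char => pr.1.isPrefixOf (c :: t)) ("<script".toList, "&lt;script".toList) = true := List.isPrefixOf_iff_prefix.2 ⟨rest, hrest⟩
        have hfind : pvPatterns.find? (fun pr => pr.1.isPrefixOf (c :: t)) = some ("<script".toList, "&lt;script".toList) := by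
          rw [pvPatterns]
          exact List.find?_cons_of_pos (p := fun pr : List Char × List Char => pr.1.isPrefixOf (c :: t)) hposb
        have hlen : rest.length ≤ n := by
          have hl := congrArg List.length hrest
          simp at hl h
          omega
        rw [scan_step_match pvPatterns "<script".toList "&lt;script".toList c t rest hfind hrest (by decide), ← hrest]
        rw [repOne_append_self "<script".toList "&lt;script".toList rest (by decide)]
        rw [repOne_skip "&lt;script".toList "javascript:".toList "javascript&#58;".toList (by decide) (repOne "<script".toList "&lt;script".toList rest)]
        rw [repOne_skip "&lt;script".toList "data:".toList "data&#58;".toList (by decide) (repOne "javascript:".toList "javascript&#58;".toList (repOne "<script".toList "&lt;script".toList rest))]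
        rw [repOne_skip "&lt;script".toList "onclick".toList "onclick&#58;".toList (by decide) (repOne "data:".toList "data&#58;".toList (repOne "javascript:".toList "javascript&#58;".toList (repOne "<script".toList "&lt;script".toList rest)))]
        rw [repOne_skip "&lt;script".toList "onerror".toList "onerror&#58;".toList (by decide) (repOne "onclick".toList "onclick&#58;".toList (repOne "data:".toList "data&#58;".toList (repOne "javascript:".toList "javascript&#58;".toList (repOne "<script".toList "&lt;script".toList rest))))]
        rw [ih rest hlen]
      · -- pattern 1 does not match at the front
        by_cases h2 : "javascript:".toList <+: (c :: t)
        · obtain ⟨rest, hrest⟩ := h2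
          have hb0 : ¬ (fun pr : List Char × List Char => pr.1.isPrefixOf (c :: t)) ("<script".toList, "&lt;script".toList) = true := fun hx => h1 (List.isPrefixOf_iff_prefix.1 hx)
          have hposb : (fun pr : List Char × List Char => pr.1.isPrefixOf (c :: t)) ("javascript:".toList, "javascript&#58;".toList) = true := List.isPrefixOf_iff_prefix.2 ⟨rest, hrest⟩
          have hfind : pvPatterns.find? (fun pr => pr.1.isPrefixOf (c :: t)) = some ("javascript:".toList, "javascript&#58;".toList) := by
            rw [pvPatterns]
            exact (List.find?_cons_of_neg (p := fun pr : List Char × List Char => pr.1.isPrefixOf (c :: t)) hb0).trans (List.find?_cons_of_pos (p := fun pr : List Char × List Char => pr.1.isPrefixOf (c :: t)) hposb)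
          have hlen : rest.length ≤ n := by
            have hl := congrArg List.length hrest
            simp at hl h
            omega
          rw [scan_step_match pvPatterns "javascript:".toList "javascript&#58;".toList c t rest hfind hrest (by decide), ← hrest]
          rw [repOne_skip "javascript:".toList "<script".toList "&lt;script".toList (by decide) rest]
          rw [repOne_append_self "javascript:".toList "javascript&#58;".toList (repOne "<script".toList "&lt;script".toList rest) (by decide)]
          rw [repOne_skip "javascript&#58;".toList "data:".toList "data&#58;".toList (by decide) (repOne "javascript:".toList "javascript&#58;".toList (repOne "<script".toList "&lt;script".toList rest))]
          rw [repOne_skip "javascript&#58;".toList "onclick".toList "onclick&#58;".toList (by decide) (repOne "data:".toList "data&#58;".toList (repOne "javascript:".toList "javascript&#58;".toList (repOne "<script".toList "&lt;script".toList rest)))]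
          rw [repOne_skip "javascript&#58;".toList "onerror".toList "onerror&#58;".toList (by decide) (repOne "onclick".toList "onclick&#58;".toList (repOne "data:".toList "data&#58;".toList (repOne "javascript:".toList "javascript&#58;".toList (repOne "<script".toList "&lt;script".toList rest))))]
          rw [ih rest hlen]
        · -- pattern 2 does not match at the front
          by_cases h3 : "data:".toList <+: (c :: t)
          · obtain ⟨rest, hrest⟩ := h3
            have hb0 : ¬ (fun pr : List Char × List Char => pr.1.isPrefixOf (c :: t)) ("<script".toList, "&lt;script".toList) = true := fun hx => h1 (List.isPrefixOf_iff_prefix.1 hx)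
            have hb1 : ¬ (fun pr : List Char × List Char => pr.1.isPrefixOf (c :: t)) ("javascript:".toList, "javascript&#58;".toList) = true := fun hx => h2 (List.isPrefixOf_iff_prefix.1 hx)
            have hposb : (fun pr : List Char × List Char => pr.1.isPrefixOf (c :: t)) ("data:".toList, "data&#58;".toList) = true := List.isPrefixOf_iff_prefix.2 ⟨rest, hrest⟩
            have hfind : pvPatterns.find? (fun pr => pr.1.isPrefixOf (c :: t)) = some ("data:".toList, "data&#58;".toList) := by
              rw [pvPatterns]
              exact (List.find?_cons_of_neg (p := fun pr : List Char × List Char => pr.1.isPrefixOf (c :: t)) hb0).trans ((List.find?_cons_of_neg (p := fun pr : List Char × List Char => pr.1.isPrefixOf (c :: t)) hb1).trans (List.find?_cons_of_pos (p := fun pr : List Char × List Char => pr.1.isPrefixOf (c :: t)) hposb))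
            have hlen : rest.length ≤ n := by
              have hl := congrArg List.length hrest
              simp at hl h
              omega
            rw [scan_step_match pvPatterns "data:".toList "data&#58;".toList c t rest hfind hrest (by decide), ← hrest]
            rw [repOne_skip "data:".toList "<script".toList "&lt;script".toList (by decide) rest]
            rw [repOne_skip "data:".toList "javascript:".toList "javascript&#58;".toList (by decide) (repOne "<script".toList "&lt;script".toList rest)]
            rw [repOne_append_self "data:".toList "data&#58;".toList (repOne "javascript:".toList "javascript&#58;".toList (repOne "<script".toList "&lt;script".toList rest)) (by decide)]
            rw [repOne_skip "data&#58;".toList "onclick".toList "onclick&#58;".toList (by decide) (repOne "data:".toList "data&#58;".toList (repOne "javascript:".toList "javascript&#58;".toList (repOne "<script".toList "&lt;script".toList rest)))]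
            rw [repOne_skip "data&#58;".toList "onerror".toList "onerror&#58;".toList (by decide) (repOne "onclick".toList "onclick&#58;".toList (repOne "data:".toList "data&#58;".toList (repOne "javascript:".toList "javascript&#58;".toList (repOne "<script".toList "&lt;script".toList rest))))]
            rw [ih rest hlen]
          · -- pattern 3 does not match at the front
            by_cases h4 : "onclick".toList <+: (c :: t)
            · obtain ⟨rest, hrest⟩ := h4
              have hb0 : ¬ (fun pr : List Char × List Char => pr.1.isPrefixOf (c :: t)) ("<script".toList, "&lt;script".toList) = true := fun hx => h1 (List.isPrefixOf_iff_prefix.1 hx)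
              have hb1 : ¬ (fun pr : List Char × List Char => pr.1.isPrefixOf (c :: t)) ("javascript:".toList, "javascript&#58;".toList) = true := fun hx => h2 (List.isPrefixOf_iff_prefix.1 hx)
              have hb2 : ¬ (fun pr : List Char × List Char => pr.1.isPrefixOf (c :: t)) ("data:".toList, "data&#58;".toList) = true := fun hx => h3 (List.isPrefixOf_iff_prefix.1 hx)
              have hposb : (fun pr : List Char × List Char => pr.1.isPrefixOf (c :: t)) ("onclick".toList, "onclick&#58;".toList) = true := List.isPrefixOf_iff_prefix.2 ⟨rest, hrest⟩
              have hfind : pvPatterns.find? (fun pr => pr.1.isPrefixOf (c :: t)) = some ("onclick".toList, "onclick&#58;".toList) := by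
                rw [pvPatterns]
                exact (List.find?_cons_of_neg (p := fun pr : List Char × List Char => pr.1.isPrefixOf (c :: t)) hb0).trans ((List.find?_cons_of_neg (p := fun pr : List Char × List Char => pr.1.isPrefixOf (c :: t)) hb1).trans ((List.find?_cons_of_neg (p := fun pr : List Char × List Char => pr.1.isPrefixOf (c :: t)) hb2).trans (List.find?_cons_of_pos (p := fun pr : List Char × List Char => pr.1.isPrefixOf (c :: t)) hposb)))
              have hlen : rest.length ≤ n := by
                have hl := congrArg List.length hrest
                simp at hl h
                omega
              rw [scan_step_match pvPatterns "onclick".toList "onclick&#58;".toList c t rest hfind hrest (by decide), ← hrest]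
              rw [repOne_skip "onclick".toList "<script".toList "&lt;script".toList (by decide) rest]
              rw [repOne_skip "onclick".toList "javascript:".toList "javascript&#58;".toList (by decide) (repOne "<script".toList "&lt;script".toList rest)]
              rw [repOne_skip "onclick".toList "data:".toList "data&#58;".toList (by decide) (repOne "javascript:".toList "javascript&#58;".toList (repOne "<script".toList "&lt;script".toList rest))]
              rw [repOne_append_self "onclick".toList "onclick&#58;".toList (repOne "data:".toList "data&#58;".toList (repOne "javascript:".toList "javascript&#58;".toList (repOne "<script".toList "&lt;script".toList rest))) (by decide)]
              rw [repOne_skip "onclick&#58;".toList "onerror".toList "onerror&#58;".toList (by decide) (repOne "onclick".toList "onclick&#58;".toList (repOne "data:".toList "data&#58;".toList (repOne "javascript:".toList "javascript&#58;".toList (repOne "<script".toList "&lt;script".toList rest))))]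
              rw [ih rest hlen]
            · -- pattern 4 does not match at the front
              by_cases h5 : "onerror".toList <+: (c :: t)
              · obtain ⟨rest, hrest⟩ := h5
                have hb0 : ¬ (fun pr : List Char × List Char => pr.1.isPrefixOf (c :: t)) ("<script".toList, "&lt;script".toList) = true := fun hx => h1 (List.isPrefixOf_iff_prefix.1 hx)
                have hb1 : ¬ (fun pr : List Char × List Char => pr.1.isPrefixOf (c :: t)) ("javascript:".toList, "javascript&#58;".toList) = true := fun hx => h2 (List.isPrefixOf_iff_prefix.1 hx)
                have hb2 : ¬ (fun pr : List Char × List Char => pr.1.isPrefixOf (c :: t)) ("data:".toList, "data&#58;".toList) = true := fun hx => h3 (List.isPrefixOf_iff_prefix.1 hx)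
                have hb3 : ¬ (fun pr : List Char × List Char => pr.1.isPrefixOf (c :: t)) ("onclick".toList, "onclick&#58;".toList) = true := fun hx => h4 (List.isPrefixOf_iff_prefix.1 hx)
                have hposb : (fun pr : List Char × List Char => pr.1.isPrefixOf (c :: t)) ("onerror".toList, "onerror&#58;".toList) = true := List.isPrefixOf_iff_prefix.2 ⟨rest, hrest⟩
                have hfind : pvPatterns.find? (fun pr => pr.1.isPrefixOf (c :: t)) = some ("onerror".toList, "onerror&#58;".toList) := by
                  rw [pvPatterns]
                  exact (List.find?_cons_of_neg (p := fun pr : List Char × List Char => pr.1.isPrefixOf (c :: t)) hb0).trans ((List.find?_cons_of_neg (p := fun pr : List Char × List Char => pr.1.isPrefixOf (c :: t)) hb1).trans ((List.find?_cons_of_neg (p := fun pr : List Char × List Char => pr.1.isPrefixOf (c :: t)) hb2).trans ((List.find?_cons_of_neg (p := fun pr : List Char × List Char => pr.1.isPrefixOf (c :: t)) hb3).trans (List.find?_cons_of_pos (p := fun pr : List Char × List Char => pr.1.isPrefixOf (c :: t)) hposb))))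
                have hlen : rest.length ≤ n := by
                  have hl := congrArg List.length hrest
                  simp at hl h
                  omega
                rw [scan_step_match pvPatterns "onerror".toList "onerror&#58;".toList c t rest hfind hrest (by decide), ← hrest]
                rw [repOne_skip "onerror".toList "<script".toList "&lt;script".toList (by decide) rest]
                rw [repOne_skip "onerror".toList "javascript:".toList "javascript&#58;".toList (by decide) (repOne "<script".toList "&lt;script".toList rest)]
                rw [repOne_skip "onerror".toList "data:".toList "data&#58;".toList (by decide) (repOne "javascript:".toList "javascript&#58;".toList (repOne "<script".toList "&lt;script".toList rest))]
                rw [repOne_skip "onerror".toList "onclick".toList "onclick&#58;".toList (by decide) (repOne "data:".toList "data&#58;".toList (repOne "javascript:".toList "javascript&#58;".toList (repOne "<script".toList "&lt;script".toList rest)))]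
                rw [repOne_append_self "onerror".toList "onerror&#58;".toList (repOne "onclick".toList "onclick&#58;".toList (repOne "data:".toList "data&#58;".toList (repOne "javascript:".toList "javascript&#58;".toList (repOne "<script".toList "&lt;script".toList rest)))) (by decide)]
                rw [ih rest hlen]
              have hb0 : ¬ (fun pr : List Char × List Char => pr.1.isPrefixOf (c :: t)) ("<script".toList, "&lt;script".toList) = true := fun hx => h1 (List.isPrefixOf_iff_prefix.1 hx)
              have hb1 : ¬ (fun pr : List Char × List Char => pr.1.isPrefixOf (c :: t)) ("javascript:".toList, "javascript&#58;".toList) = true := fun hx => h2 (List.isPrefixOf_iff_prefix.1 hx)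
              have hb2 : ¬ (fun pr : List Char × List Char => pr.1.isPrefixOf (c :: t)) ("data:".toList, "data&#58;".toList) = true := fun hx => h3 (List.isPrefixOf_iff_prefix.1 hx)
              have hb3 : ¬ (fun pr : List Char × List Char => pr.1.isPrefixOf (c :: t)) ("onclick".toList, "onclick&#58;".toList) = true := fun hx => h4 (List.isPrefixOf_iff_prefix.1 hx)
              have hb4 : ¬ (fun pr : List Char × List Char => pr.1.isPrefixOf (c :: t)) ("onerror".toList, "onerror&#58;".toList) = true := fun hx => h5 (List.isPrefixOf_iff_prefix.1 hx)
              have hfind : pvPatterns.find? (fun pr => pr.1.isPrefixOf (c :: t)) = none := by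
                rw [pvPatterns]
                exact (List.find?_cons_of_neg (p := fun pr : List Char × List Char => pr.1.isPrefixOf (c :: t)) hb0).trans ((List.find?_cons_of_neg (p := fun pr : List Char × List Char => pr.1.isPrefixOf (c :: t)) hb1).trans ((List.find?_cons_of_neg (p := fun pr : List Char × List Char => pr.1.isPrefixOf (c :: t)) hb2).trans ((List.find?_cons_of_neg (p := fun pr : List Char × List Char => pr.1.isPrefixOf (c :: t)) hb3).trans ((List.find?_cons_of_neg (p := fun pr : List Char × List Char => pr.1.isPrefixOf (c :: t)) hb4).trans (List.find?_nil)))))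
              have g1 : ¬ "<script".toList <+: (c :: t) := h1
              have g2 : ¬ "javascript:".toList <+: (repOne "<script".toList "&lt;script".toList (c :: t)) := fun hb => h2 (repOne_prefix_transfer "<script".toList "&lt;script".toList (by decide) _ _ hb (by decide))
              have g3 : ¬ "data:".toList <+: (repOne "javascript:".toList "javascript&#58;".toList (repOne "<script".toList "&lt;script".toList (c :: t))) := fun hb => h3 (repOne_prefix_transfer "<script".toList "&lt;script".toList (by decide) _ _ (repOne_prefix_transfer "javascript:".toList "javascript&#58;".toList (by decide) _ _ hb (by decide)) (by decide))
              have g4 : ¬ "onclick".toList <+: (repOne "data:".toList "data&#58;".toList (repOne "javascript:".toList "javascript&#58;".toList (repOne "<script".toList "&lt;script".toList (c :: t)))) := fun hb => h4 (repOne_prefix_transfer "<script".toList "&lt;script".toList (by decide) _ _ (repOne_prefix_transfer "javascript:".toList "javascript&#58;".toList (by decide) _ _ (repOne_prefix_transfer "data:".toList "data&#58;".toList (by decide) _ _ hb (by decide)) (by decide)) (by decide))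
              have g5 : ¬ "onerror".toList <+: (repOne "onclick".toList "onclick&#58;".toList (repOne "data:".toList "data&#58;".toList (repOne "javascript:".toList "javascript&#58;".toList (repOne "<script".toList "&lt;script".toList (c :: t))))) := fun hb => h5 (repOne_prefix_transfer "<script".toList "&lt;script".toList (by decide) _ _ (repOne_prefix_transfer "javascript:".toList "javascript&#58;".toList (by decide) _ _ (repOne_prefix_transfer "data:".toList "data&#58;".toList (by decide) _ _ (repOne_prefix_transfer "onclick".toList "onclick&#58;".toList (by decide) _ _ hb (by decide)) (by decide)) (by decide)) (by decide))
              rw [sanitize_scan, hfind]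
              rw [repOne_neg "<script".toList "&lt;script".toList c t g1] at g2 g3 g4 g5 ⊢
              rw [repOne_neg "javascript:".toList "javascript&#58;".toList c (repOne "<script".toList "&lt;script".toList t) g2] at g3 g4 g5 ⊢
              rw [repOne_neg "data:".toList "data&#58;".toList c (repOne "javascript:".toList "javascript&#58;".toList (repOne "<script".toList "&lt;script".toList t)) g3] at g4 g5 ⊢
              rw [repOne_neg "onclick".toList "onclick&#58;".toList c (repOne "data:".toList "data&#58;".toList (repOne "javascript:".toList "javascript&#58;".toList (repOne "<script".toList "&lt;script".toList t))) g4] at g5 ⊢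
              rw [repOne_neg "onerror".toList "onerror&#58;".toList c (repOne "onclick".toList "onclick&#58;".toList (repOne "data:".toList "data&#58;".toList (repOne "javascript:".toList "javascript&#58;".toList (repOne "<script".toList "&lt;script".toList t)))) g5]
              have hlen : t.length ≤ n := by simp at h; omega
              rw [ih t hlen]

theorem main_scan : ∀ (s : List Char),
    repOne "onerror".toList "onerror&#58;".toList
      (repOne "onclick".toList "onclick&#58;".toList
        (repOne "data:".toList "data&#58;".toList
          (repOne "javascript:".toList "javascript&#58;".toList
            (repOne "<script".toList "&lt;script".toList s)))) =
    sanitize_scan pvPatterns s := fun s => main_aux s.length s (le_refl _)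

-- ===== VERDICT (by name: the statement is the Claim_ definition above) =====
theorem sanitize_output_spec : Claim_equal_sanitize_output := by
  intro text _
  show sanitize_output text = sanitize_output_alt text
  simp only [sanitize_output, sanitize_output_alt]
  rw [show (PySem.Dict.ofList [("<script", "&lt;script"), ("javascript:", "javascript&#58;"), ("data:", "data&#58;"), ("onclick", "onclick&#58;"), ("onerror", "onerror&#58;")] : PySem.Dict String String).items = [("<script", "&lt;script"), ("javascript:", "javascript&#58;"), ("data:", "data&#58;"), ("onclick", "onclick&#58;"), ("onerror", "onerror&#58;")] from by decide]
  simp only [List.foldl, PySem.Str.replace, String.toList_ofList]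
  rw [replace_eq_repOne _ "<script".toList "&lt;script".toList (by decide)]
  rw [replace_eq_repOne _ "javascript:".toList "javascript&#58;".toList (by decide)]
  rw [replace_eq_repOne _ "data:".toList "data&#58;".toList (by decide)]
  rw [replace_eq_repOne _ "onclick".toList "onclick&#58;".toList (by decide)]
  rw [replace_eq_repOne _ "onerror".toList "onerror&#58;".toList (by decide)]
  exact congrArg String.ofList (main_scan text.toList)
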